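-- pv_equiv track=rewrite | github.com/JitseLambrichts/LocalAI | localai/models.py | _parse_capabilities
-- ===== SOURCE A (Python) =====
-- def _parse_capabilities(cap_tags: list[str], model_name: str) -> list[str]:
--     """
--     Build a capability list from HTML tags and model name.
--
--     cap_tags come from the search page (e.g. ['vision', 'tools', 'thinking']).
--     Additional capabilities are inferred from the model name.
--     """
--     caps = []
--     name_lower = model_name.lower()
--     tag_set = {t.lower() for t in cap_tags}
--
--     # Vision
--     if "vision" in tag_set or any(kw in name_lower for kw in ["vl", "vision", "llava", "ocr"]):
--         caps.append("vision")
--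
--     # Code
--     if any(kw in name_lower for kw in ["code", "coder", "starcoder", "devstral"]):
--         caps.append("code")
--
--     # Reasoning / thinking
--     if "thinking" in tag_set or any(kw in name_lower for kw in ["r1", "r2", "thinking", "reason", "cogito"]):
--         caps.append("reasoning")
--
--     # Tools / function calling
--     if "tools" in tag_set:
--         caps.append("tools")
--
--     # Embedding
--     if "embedding" in tag_set or "embed" in name_lower:
--         caps.append("embedding")
--
--     # RAG
--     if any(kw in name_lower for kw in ["command-r", "rag"]):
--         caps.append("rag")
--
--     # Math
--     if any(kw in name_lower for kw in ["math", "wizard-math"]):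
--         caps.append("math")
--
--     # Default: everything is at least a chat model (unless embedding-only)
--     if "embedding" not in caps:
--         caps.insert(0, "chat")
--
--     return caps
-- ===== SOURCE B (Python) =====
-- # Inverted-index strategy: instead of a branch per capability, map each known
-- # lowered tag to its capability with a reverse dict (one pass over the INPUT
-- # tags), map each name keyword to its capability with a flat keyword index
-- # (one pass over the index), accumulate an unordered 'found' set, then emit
-- # the capabilities in canonical order, prepending 'chat' unless embedding.
--
-- _TAG2CAP = {"vision": "vision", "thinking": "reasoning",
--             "tools": "tools", "embedding": "embedding"}
--
-- _KW2CAP = [("vl", "vision"), ("vision", "vision"), ("llava", "vision"), ("ocr", "vision"),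
--            ("code", "code"), ("coder", "code"), ("starcoder", "code"), ("devstral", "code"),
--            ("r1", "reasoning"), ("r2", "reasoning"), ("thinking", "reasoning"),
--            ("reason", "reasoning"), ("cogito", "reasoning"),
--            ("embed", "embedding"),
--            ("command-r", "rag"), ("rag", "rag"),
--            ("math", "math"), ("wizard-math", "math")]
--
-- _ORDER = ["vision", "code", "reasoning", "tools", "embedding", "rag", "math"]
--
--
-- def _parse_capabilities(cap_tags: list[str], model_name: str) -> list[str]:
--     name = model_name.lower()
--     found = set()
--     for t in cap_tags:
--         cap = _TAG2CAP.get(t.lower())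
--         if cap is not None:
--             found.add(cap)
--     for kw, cap in _KW2CAP:
--         if kw in name:
--             found.add(cap)
--     out = [c for c in _ORDER if c in found]
--     return out if "embedding" in found else ["chat"] + out
-- ===== Notes on version B (the rewrite author's own statement) =====
-- stated objective: alternative
-- what changed: Inverts the control flow: instead of one branch per capability re-scanning tags and keywords, B iterates once over the input tags through a reverse tag->capability dict and once over a flat keyword->capability index, accumulating an unordered found-set, then emits capabilities in a canonical order with the chat-prepend rule.
import Mathlib
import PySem

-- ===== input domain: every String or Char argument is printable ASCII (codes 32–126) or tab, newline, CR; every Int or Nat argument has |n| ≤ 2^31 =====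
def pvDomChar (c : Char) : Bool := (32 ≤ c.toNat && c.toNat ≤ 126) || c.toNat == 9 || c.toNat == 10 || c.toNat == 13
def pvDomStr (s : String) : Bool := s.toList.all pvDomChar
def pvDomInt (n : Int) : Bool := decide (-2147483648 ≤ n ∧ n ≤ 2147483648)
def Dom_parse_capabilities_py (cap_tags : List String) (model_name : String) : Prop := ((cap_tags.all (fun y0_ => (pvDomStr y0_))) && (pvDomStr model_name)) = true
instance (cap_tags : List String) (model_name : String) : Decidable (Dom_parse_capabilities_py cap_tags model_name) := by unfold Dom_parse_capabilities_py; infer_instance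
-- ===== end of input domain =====

-- B inverts the control flow: one pass over the input tags through a reverse tag→capability
-- dict and one pass over a flat keyword→capability index accumulate an unordered found-set,
-- then capabilities are emitted in canonical order (objective: alternative); same return values.

-- ===== PORT A =====
def parse_capabilities_py (cap_tags : List String) (model_name : String) : List String :=
  let caps : List String := []
  let name_lower := PySem.Str.lower model_name
  let tag_set : PySem.Set String := PySem.Set.ofList (cap_tags.map PySem.Str.lower)
  -- Vision
  let caps := if PySem.Set.contains tag_set "vision"
                || (["vl", "vision", "llava", "ocr"].any fun kw => PySem.Str.isIn kw name_lower)
              then caps ++ ["vision"] else caps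
  -- Code
  let caps := if (["code", "coder", "starcoder", "devstral"].any fun kw => PySem.Str.isIn kw name_lower)
              then caps ++ ["code"] else caps
  -- Reasoning / thinking
  let caps := if PySem.Set.contains tag_set "thinking"
                || (["r1", "r2", "thinking", "reason", "cogito"].any fun kw => PySem.Str.isIn kw name_lower)
              then caps ++ ["reasoning"] else caps
  -- Tools / function calling
  let caps := if PySem.Set.contains tag_set "tools" then caps ++ ["tools"] else caps
  -- Embedding
  let caps := if PySem.Set.contains tag_set "embedding" || PySem.Str.isIn "embed" name_lower
              then caps ++ ["embedding"] else caps
  -- RAG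
  let caps := if (["command-r", "rag"].any fun kw => PySem.Str.isIn kw name_lower)
              then caps ++ ["rag"] else caps
  -- Math
  let caps := if (["math", "wizard-math"].any fun kw => PySem.Str.isIn kw name_lower)
              then caps ++ ["math"] else caps
  -- Default: everything is at least a chat model (unless embedding-only)
  let caps := if !(caps.contains "embedding") then "chat" :: caps else caps
  caps

-- ===== PORT B =====
def pvTag2Cap : PySem.Dict String String :=
  PySem.Dict.ofList
    [("vision", "vision"), ("thinking", "reasoning"), ("tools", "tools"), ("embedding", "embedding")]

def pvKw2Cap : List (String × String) :=
  [("vl", "vision"), ("vision", "vision"), ("llava", "vision"), ("ocr", "vision"),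
   ("code", "code"), ("coder", "code"), ("starcoder", "code"), ("devstral", "code"),
   ("r1", "reasoning"), ("r2", "reasoning"), ("thinking", "reasoning"),
   ("reason", "reasoning"), ("cogito", "reasoning"),
   ("embed", "embedding"),
   ("command-r", "rag"), ("rag", "rag"),
   ("math", "math"), ("wizard-math", "math")]

def pvOrder : List String :=
  ["vision", "code", "reasoning", "tools", "embedding", "rag", "math"]

-- Source B's first loop: collect capabilities of recognised lowered tags
def pvFoundTags (cap_tags : List String) : PySem.Set String :=
  cap_tags.foldl
    (fun s t =>
      match pvTag2Cap.get? (PySem.Str.lower t) with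
      | some cap => PySem.Set.add s cap
      | none => s)
    PySem.Set.empty

-- Source B's second loop: add capabilities whose keyword occurs in the lowered name
def pvFound (cap_tags : List String) (name : String) : PySem.Set String :=
  pvKw2Cap.foldl
    (fun s p => if PySem.Str.isIn p.1 name then PySem.Set.add s p.2 else s)
    (pvFoundTags cap_tags)

def parse_capabilities_py_alt (cap_tags : List String) (model_name : String) : List String :=
  let name := PySem.Str.lower model_name
  let found := pvFound cap_tags name
  let out := pvOrder.filter (fun c => PySem.Set.contains found c)
  if PySem.Set.contains found "embedding" then out else "chat" :: out

-- ===== PRECONDITION & SPEC =====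
def Spec_parse_capabilities_py (cap_tags : List String) (model_name : String) (out : List String) : Prop := out = parse_capabilities_py_alt cap_tags model_name
instance (cap_tags : List String) (model_name : String) (out : List String) : Decidable (Spec_parse_capabilities_py cap_tags model_name out) := by unfold Spec_parse_capabilities_py; infer_instance

-- ===== CLAIM (what is proved, stated in full; the proofs are below) =====
def Claim_equal_parse_capabilities_py : Prop := ∀ (cap_tags : List String) (model_name : String), Dom_parse_capabilities_py cap_tags model_name → Spec_parse_capabilities_py cap_tags model_name (parse_capabilities_py cap_tags model_name)

-- ===== LEMMAS AND PROOFS =====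

-- the capability list as a function of the seven capability booleans
def pvCapsOf (b1 b2 b3 b4 b5 b6 b7 : Bool) : List String :=
  (if b1 then ["vision"] else []) ++ ((if b2 then ["code"] else []) ++
    ((if b3 then ["reasoning"] else []) ++ ((if b4 then ["tools"] else []) ++
      ((if b5 then ["embedding"] else []) ++ ((if b6 then ["rag"] else []) ++
        (if b7 then ["math"] else []))))))

-- A's if-chain with its seven conditions abstracted as booleans
def pvChainA (b1 b2 b3 b4 b5 b6 b7 : Bool) : List String :=
  let caps : List String := []
  let caps := if b1 then caps ++ ["vision"] else caps
  let caps := if b2 then caps ++ ["code"] else caps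
  let caps := if b3 then caps ++ ["reasoning"] else caps
  let caps := if b4 then caps ++ ["tools"] else caps
  let caps := if b5 then caps ++ ["embedding"] else caps
  let caps := if b6 then caps ++ ["rag"] else caps
  let caps := if b7 then caps ++ ["math"] else caps
  if !(caps.contains "embedding") then "chat" :: caps else caps

theorem pvChainA_eq (b1 b2 b3 b4 b5 b6 b7 : Bool) :
    pvChainA b1 b2 b3 b4 b5 b6 b7 =
      (if b5 then pvCapsOf b1 b2 b3 b4 b5 b6 b7
       else "chat" :: pvCapsOf b1 b2 b3 b4 b5 b6 b7) := by
  cases b1 <;> cases b2 <;> cases b3 <;> cases b4 <;> cases b5 <;> cases b6 <;> cases b7 <;> rfl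

theorem pvFilter_order (q : String → Bool) :
    pvOrder.filter q =
      pvCapsOf (q "vision") (q "code") (q "reasoning") (q "tools")
        (q "embedding") (q "rag") (q "math") := by
  simp only [pvOrder, List.filter_cons, List.filter_nil]
  generalize q "vision" = b1; generalize q "code" = b2; generalize q "reasoning" = b3
  generalize q "tools" = b4; generalize q "embedding" = b5; generalize q "rag" = b6
  generalize q "math" = b7
  cases b1 <;> cases b2 <;> cases b3 <;> cases b4 <;> cases b5 <;> cases b6 <;> cases b7 <;> rfl

theorem get?_tag2cap (s : String) : pvTag2Cap.get? s =
    (if "vision" == s then some "vision" else if "thinking" == s then some "reasoning"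
     else if "tools" == s then some "tools" else if "embedding" == s then some "embedding" else none) := by
  show Option.map (fun x => x.2) (List.find? (fun p => p.1 == s)
    [("vision", "vision"), ("thinking", "reasoning"), ("tools", "tools"), ("embedding", "embedding")]) = _
  split_ifs with h1 h2 h3 h4
  · obtain rfl := eq_of_beq h1; decide
  · obtain rfl := eq_of_beq h2; decide
  · obtain rfl := eq_of_beq h3; decide
  · obtain rfl := eq_of_beq h4; decide
  · simp only [List.find?]
    rw [show (("vision", "vision").1 == s) = false from by simpa using (Bool.of_not_eq_true h1),
        show (("thinking", "reasoning").1 == s) = false from by simpa using (Bool.of_not_eq_true h2),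
        show (("tools", "tools").1 == s) = false from by simpa using (Bool.of_not_eq_true h3),
        show (("embedding", "embedding").1 == s) = false from by simpa using (Bool.of_not_eq_true h4)]
    rfl

theorem mem_foundTags_aux (l : List String) (s0 : PySem.Set String) (y : String) :
    y ∈ l.foldl
        (fun s t =>
          match pvTag2Cap.get? (PySem.Str.lower t) with
          | some cap => PySem.Set.add s cap
          | none => s) s0 ↔
      y ∈ s0 ∨ ∃ t ∈ l, pvTag2Cap.get? (PySem.Str.lower t) = some y := by
  induction l generalizing s0 with
  | nil => simp
  | cons hd tl ih =>
    simp only [List.foldl_cons, List.mem_cons]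
    cases h : pvTag2Cap.get? (PySem.Str.lower hd) with
    | none =>
      rw [ih]
      constructor
      · rintro (hy | ⟨t, ht, hg⟩)
        · exact Or.inl hy
        · exact Or.inr ⟨t, Or.inr ht, hg⟩
      · rintro (hy | ⟨t, (rfl | ht), hg⟩)
        · exact Or.inl hy
        · rw [h] at hg; cases hg
        · exact Or.inr ⟨t, ht, hg⟩
    | some cap =>
      rw [ih]
      simp only [PySem.Set.mem_add]
      constructor
      · rintro ((hy | rfl) | ⟨t, ht, hg⟩)
        · exact Or.inl hy
        · exact Or.inr ⟨hd, Or.inl rfl, h⟩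
        · exact Or.inr ⟨t, Or.inr ht, hg⟩
      · rintro (hy | ⟨t, (rfl | ht), hg⟩)
        · exact Or.inl (Or.inl hy)
        · rw [h] at hg; cases hg; exact Or.inl (Or.inr rfl)
        · exact Or.inr ⟨t, ht, hg⟩

theorem mem_found_aux (l : List (String × String)) (name : String) (s0 : PySem.Set String) (y : String) :
    y ∈ l.foldl (fun s p => if PySem.Str.isIn p.1 name then PySem.Set.add s p.2 else s) s0 ↔
      y ∈ s0 ∨ ∃ p ∈ l, PySem.Str.isIn p.1 name = true ∧ p.2 = y := by
  induction l generalizing s0 with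
  | nil => simp
  | cons hd tl ih =>
    simp only [List.foldl_cons, List.mem_cons]
    by_cases h : PySem.Str.isIn hd.1 name
    · rw [if_pos h, ih]
      simp only [PySem.Set.mem_add]
      constructor
      · rintro ((hy | rfl) | ⟨p, hp, hi, rfl⟩)
        · exact Or.inl hy
        · exact Or.inr ⟨hd, Or.inl rfl, h, rfl⟩
        · exact Or.inr ⟨p, Or.inr hp, hi, rfl⟩
      · rintro (hy | ⟨p, (rfl | hp), hi, rfl⟩)
        · exact Or.inl (Or.inl hy)
        · exact Or.inl (Or.inr rfl)
        · exact Or.inr ⟨p, hp, hi, rfl⟩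
    · rw [if_neg h, ih]
      constructor
      · rintro (hy | ⟨p, hp, hi, rfl⟩)
        · exact Or.inl hy
        · exact Or.inr ⟨p, Or.inr hp, hi, rfl⟩
      · rintro (hy | ⟨p, (rfl | hp), hi, rfl⟩)
        · exact Or.inl hy
        · exact absurd hi h
        · exact Or.inr ⟨p, hp, hi, rfl⟩

theorem mem_found (ct : List String) (name y : String) :
    y ∈ pvFound ct name ↔
      (∃ t ∈ ct, pvTag2Cap.get? (PySem.Str.lower t) = some y) ∨
        ∃ p ∈ pvKw2Cap, PySem.Str.isIn p.1 name = true ∧ p.2 = y := by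
  unfold pvFound pvFoundTags
  rw [mem_found_aux, mem_foundTags_aux]
  simp [PySem.Set.empty]

theorem get?_eq_vision (s : String) : pvTag2Cap.get? s = some "vision" ↔ s = "vision" := by
  rw [get?_tag2cap]; split_ifs with h1 h2 h3 h4
  · simp [← eq_of_beq h1]
  · simp [← eq_of_beq h2]
  · simp [← eq_of_beq h3]
  · simp [← eq_of_beq h4]
  · constructor
    · intro h; cases h
    · intro h; first | exact h.elim | (subst h; simp at h1 h2 h3 h4)
theorem get?_eq_reasoning (s : String) : pvTag2Cap.get? s = some "reasoning" ↔ s = "thinking" := by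
  rw [get?_tag2cap]; split_ifs with h1 h2 h3 h4
  · simp [← eq_of_beq h1]
  · simp [← eq_of_beq h2]
  · simp [← eq_of_beq h3]
  · simp [← eq_of_beq h4]
  · constructor
    · intro h; cases h
    · intro h; first | exact h.elim | (subst h; simp at h1 h2 h3 h4)
theorem get?_eq_tools (s : String) : pvTag2Cap.get? s = some "tools" ↔ s = "tools" := by
  rw [get?_tag2cap]; split_ifs with h1 h2 h3 h4
  · simp [← eq_of_beq h1]
  · simp [← eq_of_beq h2]
  · simp [← eq_of_beq h3]
  · simp [← eq_of_beq h4]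
  · constructor
    · intro h; cases h
    · intro h; first | exact h.elim | (subst h; simp at h1 h2 h3 h4)
theorem get?_eq_embedding (s : String) : pvTag2Cap.get? s = some "embedding" ↔ s = "embedding" := by
  rw [get?_tag2cap]; split_ifs with h1 h2 h3 h4
  · simp [← eq_of_beq h1]
  · simp [← eq_of_beq h2]
  · simp [← eq_of_beq h3]
  · simp [← eq_of_beq h4]
  · constructor
    · intro h; cases h
    · intro h; first | exact h.elim | (subst h; simp at h1 h2 h3 h4)
theorem get?_eq_code (s : String) : pvTag2Cap.get? s = some "code" ↔ False := by
  rw [get?_tag2cap]; split_ifs with h1 h2 h3 h4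
  · simp [← eq_of_beq h1]
  · simp [← eq_of_beq h2]
  · simp [← eq_of_beq h3]
  · simp [← eq_of_beq h4]
  · constructor
    · intro h; cases h
    · intro h; first | exact h.elim | (subst h; simp at h1 h2 h3 h4)
theorem get?_eq_rag (s : String) : pvTag2Cap.get? s = some "rag" ↔ False := by
  rw [get?_tag2cap]; split_ifs with h1 h2 h3 h4
  · simp [← eq_of_beq h1]
  · simp [← eq_of_beq h2]
  · simp [← eq_of_beq h3]
  · simp [← eq_of_beq h4]
  · constructor
    · intro h; cases h
    · intro h; first | exact h.elim | (subst h; simp at h1 h2 h3 h4)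
theorem get?_eq_math (s : String) : pvTag2Cap.get? s = some "math" ↔ False := by
  rw [get?_tag2cap]; split_ifs with h1 h2 h3 h4
  · simp [← eq_of_beq h1]
  · simp [← eq_of_beq h2]
  · simp [← eq_of_beq h3]
  · simp [← eq_of_beq h4]
  · constructor
    · intro h; cases h
    · intro h; first | exact h.elim | (subst h; simp at h1 h2 h3 h4)
theorem kw_vision (nm : String) :
    (∃ p ∈ pvKw2Cap, PySem.Str.isIn p.1 nm = true ∧ p.2 = "vision") ↔
      (["vl", "vision", "llava", "ocr"].any fun kw => PySem.Str.isIn kw nm) = true := by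
  simp [pvKw2Cap]
theorem kw_code (nm : String) :
    (∃ p ∈ pvKw2Cap, PySem.Str.isIn p.1 nm = true ∧ p.2 = "code") ↔
      (["code", "coder", "starcoder", "devstral"].any fun kw => PySem.Str.isIn kw nm) = true := by
  simp [pvKw2Cap]
theorem kw_reasoning (nm : String) :
    (∃ p ∈ pvKw2Cap, PySem.Str.isIn p.1 nm = true ∧ p.2 = "reasoning") ↔
      (["r1", "r2", "thinking", "reason", "cogito"].any fun kw => PySem.Str.isIn kw nm) = true := by
  simp [pvKw2Cap]
theorem kw_tools (nm : String) :
    (∃ p ∈ pvKw2Cap, PySem.Str.isIn p.1 nm = true ∧ p.2 = "tools") ↔ False := by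
  simp [pvKw2Cap]
theorem kw_embedding (nm : String) :
    (∃ p ∈ pvKw2Cap, PySem.Str.isIn p.1 nm = true ∧ p.2 = "embedding") ↔
      PySem.Str.isIn "embed" nm = true := by
  simp [pvKw2Cap]
theorem kw_rag (nm : String) :
    (∃ p ∈ pvKw2Cap, PySem.Str.isIn p.1 nm = true ∧ p.2 = "rag") ↔
      (["command-r", "rag"].any fun kw => PySem.Str.isIn kw nm) = true := by
  simp [pvKw2Cap]
theorem kw_math (nm : String) :
    (∃ p ∈ pvKw2Cap, PySem.Str.isIn p.1 nm = true ∧ p.2 = "math") ↔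
      (["math", "wizard-math"].any fun kw => PySem.Str.isIn kw nm) = true := by
  simp [pvKw2Cap]

-- ===== VERDICT (by name: the statement is the Claim_ definition above) =====
theorem parse_capabilities_py_spec : Claim_equal_parse_capabilities_py := by
  intro ct mn _
  show parse_capabilities_py ct mn = parse_capabilities_py_alt ct mn
  have hA : parse_capabilities_py ct mn =
      pvChainA
        (PySem.Set.contains (PySem.Set.ofList (ct.map PySem.Str.lower)) "vision"
          || (["vl", "vision", "llava", "ocr"].any fun kw => PySem.Str.isIn kw (PySem.Str.lower mn)))
        (["code", "coder", "starcoder", "devstral"].any fun kw => PySem.Str.isIn kw (PySem.Str.lower mn))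
        (PySem.Set.contains (PySem.Set.ofList (ct.map PySem.Str.lower)) "thinking"
          || (["r1", "r2", "thinking", "reason", "cogito"].any fun kw => PySem.Str.isIn kw (PySem.Str.lower mn)))
        (PySem.Set.contains (PySem.Set.ofList (ct.map PySem.Str.lower)) "tools")
        (PySem.Set.contains (PySem.Set.ofList (ct.map PySem.Str.lower)) "embedding"
          || PySem.Str.isIn "embed" (PySem.Str.lower mn))
        (["command-r", "rag"].any fun kw => PySem.Str.isIn kw (PySem.Str.lower mn))
        (["math", "wizard-math"].any fun kw => PySem.Str.isIn kw (PySem.Str.lower mn)) := rfl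
  have hB : parse_capabilities_py_alt ct mn =
      (if PySem.Set.contains (pvFound ct (PySem.Str.lower mn)) "embedding"
       then pvOrder.filter (fun c => PySem.Set.contains (pvFound ct (PySem.Str.lower mn)) c)
       else "chat" :: pvOrder.filter (fun c => PySem.Set.contains (pvFound ct (PySem.Str.lower mn)) c)) := rfl
  have hcap : ∀ c : String,
      PySem.Set.contains (pvFound ct (PySem.Str.lower mn)) c = true ↔
        (∃ t ∈ ct, pvTag2Cap.get? (PySem.Str.lower t) = some c) ∨
          ∃ p ∈ pvKw2Cap, PySem.Str.isIn p.1 (PySem.Str.lower mn) = true ∧ p.2 = c := by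
    intro c; rw [PySem.Set.contains_iff, mem_found]
  have htag : ∀ c : String,
      (PySem.Set.contains (PySem.Set.ofList (ct.map PySem.Str.lower)) c = true) ↔
        ∃ t ∈ ct, PySem.Str.lower t = c := by
    intro c
    rw [PySem.Set.contains_iff, PySem.Set.mem_ofList]
    simp [List.mem_map]
  have hv : PySem.Set.contains (pvFound ct (PySem.Str.lower mn)) "vision" =
      (PySem.Set.contains (PySem.Set.ofList (ct.map PySem.Str.lower)) "vision"
        || (["vl", "vision", "llava", "ocr"].any fun kw => PySem.Str.isIn kw (PySem.Str.lower mn))) := by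
    rw [Bool.eq_iff_iff, hcap, Bool.or_eq_true, htag]
    simp only [get?_eq_vision, kw_vision]
  have hc : PySem.Set.contains (pvFound ct (PySem.Str.lower mn)) "code" =
      (["code", "coder", "starcoder", "devstral"].any fun kw => PySem.Str.isIn kw (PySem.Str.lower mn)) := by
    rw [Bool.eq_iff_iff, hcap]
    simp only [get?_eq_code, kw_code, and_false, exists_false, false_or]
  have hr : PySem.Set.contains (pvFound ct (PySem.Str.lower mn)) "reasoning" =
      (PySem.Set.contains (PySem.Set.ofList (ct.map PySem.Str.lower)) "thinking"
        || (["r1", "r2", "thinking", "reason", "cogito"].any fun kw => PySem.Str.isIn kw (PySem.Str.lower mn))) := by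
    rw [Bool.eq_iff_iff, hcap, Bool.or_eq_true, htag]
    simp only [get?_eq_reasoning, kw_reasoning]
  have ht : PySem.Set.contains (pvFound ct (PySem.Str.lower mn)) "tools" =
      PySem.Set.contains (PySem.Set.ofList (ct.map PySem.Str.lower)) "tools" := by
    rw [Bool.eq_iff_iff, hcap, htag]
    simp only [get?_eq_tools, kw_tools, or_false]
  have he : PySem.Set.contains (pvFound ct (PySem.Str.lower mn)) "embedding" =
      (PySem.Set.contains (PySem.Set.ofList (ct.map PySem.Str.lower)) "embedding"
        || PySem.Str.isIn "embed" (PySem.Str.lower mn)) := by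
    rw [Bool.eq_iff_iff, hcap, Bool.or_eq_true, htag]
    simp only [get?_eq_embedding, kw_embedding]
  have hg : PySem.Set.contains (pvFound ct (PySem.Str.lower mn)) "rag" =
      (["command-r", "rag"].any fun kw => PySem.Str.isIn kw (PySem.Str.lower mn)) := by
    rw [Bool.eq_iff_iff, hcap]
    simp only [get?_eq_rag, kw_rag, and_false, exists_false, false_or]
  have hm : PySem.Set.contains (pvFound ct (PySem.Str.lower mn)) "math" =
      (["math", "wizard-math"].any fun kw => PySem.Str.isIn kw (PySem.Str.lower mn)) := by
    rw [Bool.eq_iff_iff, hcap]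
    simp only [get?_eq_math, kw_math, and_false, exists_false, false_or]
  rw [hA, pvChainA_eq, hB, pvFilter_order, hv, hc, hr, ht, he, hg, hm]
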